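-- pv_equiv track=rewrite | github.com/annaoskarson/aoc2023 | aoc2023-07.py | ranking
-- ===== SOURCE A (Python) =====
-- def ranking(list):
--     ans = 0
--     rank = len(list)
--     i = 0
--     while i < len(list):
--         ans += rank * list[i][1]
--         i += 1
--         rank -= 1
--     return(ans)
-- ===== SOURCE B (Python) =====
-- def ranking(list):
--     # Running-prefix-sum decomposition: the rank-weighted sum equals the sum
--     # of all prefix sums, so no rank counter or multiplication is needed.
--     ans = 0
--     run = 0
--     for _, v in list:
--         run += v
--         ans += run
--     return ans
-- ===== Notes on version B (the rewrite author's own statement) =====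
-- stated objective: alternative
-- what changed: Replaced the indexed while-loop multiplying each value by a descending rank counter with a single forward for-loop that keeps a running prefix sum and adds it to the answer (sum of prefix sums identity); no index, rank or multiplication remains.
import Mathlib
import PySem

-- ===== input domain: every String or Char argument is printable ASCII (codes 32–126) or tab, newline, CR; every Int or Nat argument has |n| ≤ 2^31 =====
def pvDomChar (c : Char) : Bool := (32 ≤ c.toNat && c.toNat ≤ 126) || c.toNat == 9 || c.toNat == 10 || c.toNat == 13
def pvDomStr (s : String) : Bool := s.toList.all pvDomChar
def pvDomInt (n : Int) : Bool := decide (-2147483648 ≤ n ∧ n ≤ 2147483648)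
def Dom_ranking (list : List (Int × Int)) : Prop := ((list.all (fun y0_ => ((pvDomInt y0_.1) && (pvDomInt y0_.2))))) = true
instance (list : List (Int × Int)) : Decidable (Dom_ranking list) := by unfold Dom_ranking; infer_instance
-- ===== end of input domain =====

-- B replaces A's descending-rank multiply loop with a running prefix-sum pass (alternative decomposition, same cost).


-- ===== PORT A =====
-- while-loop of A: state (ans, rank, i); list[i] is always in range here, ported via pyGet? with
-- an unreachable default for the none (IndexError) case.
def rankingAux (list : List (Int × Int)) (ans rank : Int) (i : Nat) : Int :=
  if _h : i < list.length then
    rankingAux list (ans + rank * ((PySem.List.pyGet? list (i : Int)).getD (0, 0)).2) (rank - 1) (i + 1)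
  else ans
termination_by list.length - i

def ranking (list : List (Int × Int)) : Int :=
  rankingAux list 0 (list.length : Int) 0

-- ===== PORT B =====
def ranking_alt (list : List (Int × Int)) : Int :=
  (list.foldl (fun s p => (s.1 + (s.2 + p.2), s.2 + p.2)) ((0 : Int), (0 : Int))).1

-- ===== PRECONDITION & SPEC =====
def Spec_ranking (list : List (Int × Int)) (out : Int) : Prop := out = ranking_alt list
instance (list : List (Int × Int)) (out : Int) : Decidable (Spec_ranking list out) := by unfold Spec_ranking; infer_instance

-- ===== CLAIM (what is proved, stated in full; the proofs are below) =====
def Claim_equal_ranking : Prop := ∀ (list : List (Int × Int)), Dom_ranking list → Spec_ranking list (ranking list)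

-- ===== LEMMAS AND PROOFS =====

-- shifting the start index past the head drops the head
theorem rankingAux_cons_shift (xs : List (Int × Int)) (x : Int × Int) :
    ∀ (i : Nat) (ans rank : Int),
      rankingAux (x :: xs) ans rank (i + 1) = rankingAux xs ans rank i := by
  intro i
  induction h : xs.length - i generalizing i with
  | zero =>
    intro ans rank
    conv_lhs => rw [rankingAux]
    conv_rhs => rw [rankingAux]
    simp [show ¬ i + 1 < xs.length + 1 by omega, show ¬ i < xs.length by omega]
  | succ n ih =>
    intro ans rank
    conv_lhs => rw [rankingAux]
    conv_rhs => rw [rankingAux]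
    have hlt : i < xs.length := by omega
    rw [dif_pos (show i + 1 < (x :: xs).length by simp; omega), dif_pos hlt]
    have hget : PySem.List.pyGet? (x :: xs) (((i + 1 : Nat)) : Int)
        = PySem.List.pyGet? xs (i : Int) := by
      simp [PySem.List.pyGet?_natCast]
    rw [hget]
    exact ih (i + 1) (by omega) _ _

theorem foldB_eq_aux (l : List (Int × Int)) :
    ∀ (ans run : Int),
      (l.foldl (fun s p => (s.1 + (s.2 + p.2), s.2 + p.2)) (ans, run)).1
        = rankingAux l (ans + (l.length : Int) * run) (l.length : Int) 0 := by
  induction l with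
  | nil =>
    intro ans run
    rw [rankingAux]
    simp
  | cons x xs ih =>
    intro ans run
    simp only [List.foldl_cons]
    rw [ih]
    conv_rhs => rw [rankingAux]
    rw [dif_pos (show 0 < (x :: xs).length by simp)]
    rw [show (0 : Nat) + 1 = 0 + 1 from rfl, rankingAux_cons_shift]
    have hget : PySem.List.pyGet? (x :: xs) ((0 : Nat) : Int) = some x := by
      simp
    congr 1
    · rw [hget]
      simp only [Option.getD_some, List.length_cons]
      push_cast
      ring
    · simp only [List.length_cons]
      push_cast
      ring

-- ===== VERDICT (by name: the statement is the Claim_ definition above) =====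
theorem ranking_spec : Claim_equal_ranking := by
  intro list _
  show ranking list = ranking_alt list
  unfold ranking ranking_alt
  rw [foldB_eq_aux]
  simp
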